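-- pv_equiv track=rewrite | github.com/PROFESSOR-ADNAN/A2SV_Solved_Questions | B_Robot_Program.py | robot_program
-- ===== SOURCE A (Python) =====
-- def robot_program(n, x, k, commands):
--
--     flag = False
--     for cm in commands:
--         if cm == "L":
--             x -= 1
--         else:
--             x += 1
--
--         k -= 1
--         if x == 0:
--             flag = True
--             break
--         if k == 0:
--             return 0
--
--     if not flag:
--         return 0
--
--     ans = 1
--     t = 0
--     flag = False
--
--     for cm in commands:
--         if cm == "L":
--             x -= 1
--         else:
--             x += 1
--         t += 1
--         if x == 0:
--             flag = True
--             break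
--
--     if flag:
--         ans += k // t
--
--     return ans
-- ===== SOURCE B (Python) =====
-- def robot_program(n, x, k, commands):
--     """Count how many of the first k steps end at the origin.
--
--     One scan over the commands records i0, the first step whose running
--     displacement s equals -x (the robot stands at 0), and t, the first step
--     with s == 0 (the walk's period).  The origin is then visited exactly at
--     steps i0, i0 + t, i0 + 2*t, ..., so the answer is the number of members
--     of that arithmetic progression lying in [1, k].
--     """
--     s = 0
--     i0 = t = None
--     for j, cm in enumerate(commands, 1):
--         s += -1 if cm == "L" else 1
--         if i0 is None and s == -x:
--             i0 = j
--         if t is None and s == 0: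
--             t = j
--     if i0 is None:
--         return 0
--     if t is None:
--         return 1 if i0 <= k else 0
--     return max(0, (k - i0) // t + 1)
-- ===== Notes on version B (the rewrite author's own statement) =====
-- stated objective: alternative
-- what changed: Replaces A's two mutating simulation loops (position/countdown with early returns and a flag) by one scan that records the first origin hit i0 and the period t, then counts the members of the arithmetic progression i0, i0+t, ... lying in [1, k] with a clamped closed-form formula.
-- intended difference: When k <= 0 (no steps allowed) but the walk does reach the origin, A's dead 'k == 0' countdown check lets the simulation run and it returns 1 (or a negative floor-division result); B returns 0, the number of origin visits within the first k steps, which is the intended count. — e.g. on robot_program(0, 1, 0, ["L"]): A returns 1, B returns 0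
import Mathlib
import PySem

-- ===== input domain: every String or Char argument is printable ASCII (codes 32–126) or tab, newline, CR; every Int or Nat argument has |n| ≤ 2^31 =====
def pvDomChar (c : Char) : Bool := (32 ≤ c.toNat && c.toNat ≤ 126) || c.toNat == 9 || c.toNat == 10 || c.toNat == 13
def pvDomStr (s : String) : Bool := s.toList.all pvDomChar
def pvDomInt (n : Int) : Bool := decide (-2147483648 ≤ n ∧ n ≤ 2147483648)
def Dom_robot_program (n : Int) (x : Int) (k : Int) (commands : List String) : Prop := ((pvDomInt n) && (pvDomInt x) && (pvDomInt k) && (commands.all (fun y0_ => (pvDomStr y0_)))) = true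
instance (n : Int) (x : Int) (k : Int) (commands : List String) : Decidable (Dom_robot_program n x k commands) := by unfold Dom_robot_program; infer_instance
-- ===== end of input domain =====

-- B replaces A's two mutating simulation loops by one scan recording the first origin
-- hit and the period, plus a clamped arithmetic-progression count (objective:
-- alternative decomposition, same linear cost); B fixes A's value for k ≤ 0 (see D_).

-- ===== PORT A =====
-- first loop of A: walk the commands updating x and k; some (x, k) at 'flag = True; break',
-- none where A returns 0 inside the loop or falls off the end without the flag
def robotLoop1 : List String → Int → Int → Option (Int × Int)
  | [], _, _ => none
  | cm :: rest, x, k =>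
    let x' := if cm = "L" then x - 1 else x + 1
    let k' := k - 1
    if x' = 0 then some (x', k')
    else if k' = 0 then none
    else robotLoop1 rest x' k'

-- second loop of A: some t at the break, none if the commands run out
def robotLoop2 : List String → Int → Int → Option Int
  | [], _, _ => none
  | cm :: rest, x, t =>
    let x' := if cm = "L" then x - 1 else x + 1
    let t' := t + 1
    if x' = 0 then some t' else robotLoop2 rest x' t'

def robot_program (n : Int) (x : Int) (k : Int) (commands : List String) : Int :=
  match robotLoop1 commands x k with
  | none => 0
  | some (x1, k1) =>
    match robotLoop2 commands x1 0 with
    | none => 1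
    | some t => 1 + PySem.Int.floordiv k1 t

-- ===== PORT B =====
-- Source B's single scan: running sum s, step counter j, first hit i0, period t
def altScan (x : Int) : List String → Int → Int → Option Int → Option Int → Option Int × Option Int
  | [], _, _, i0, t => (i0, t)
  | cm :: rest, s, j, i0, t =>
    let s' := s + (if cm = "L" then (-1 : Int) else 1)
    let i0' := if i0 = none ∧ s' = -x then some j else i0
    let t' := if t = none ∧ s' = 0 then some j else t
    altScan x rest s' (j + 1) i0' t'

def robot_program_alt (n : Int) (x : Int) (k : Int) (commands : List String) : Int :=
  match altScan x commands 0 1 none none with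
  | (none, _) => 0
  | (some i0, none) => if i0 ≤ k then 1 else 0
  | (some i0, some t) => max 0 (PySem.Int.floordiv (k - i0) t + 1)

-- ===== PRECONDITION & SPEC =====
-- the robot's displacement after each command
def pvDisp (commands : List String) : List Int :=
  ((commands.map fun c => if c = "L" then (-1 : Int) else 1).scanl (· + ·) 0).tail

-- When k ≤ 0 (no steps allowed) but the walk does reach the origin, A's dead
-- 'k == 0' countdown check lets the simulation run and it returns 1 (or a negative
-- floor-division result); B returns 0, the number of origin visits within the
-- first k steps, which is the intended count.
def D_robot_program (n : Int) (x : Int) (k : Int) (commands : List String) : Prop :=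
  k ≤ 0 ∧ -x ∈ pvDisp commands ∧
    ((0 : Int) ∉ pvDisp commands ∨
      k < ((pvDisp commands).idxOf (-x) : Int) - (pvDisp commands).idxOf 0)

instance (n : Int) (x : Int) (k : Int) (commands : List String) : Decidable (D_robot_program n x k commands) := by
  unfold D_robot_program; infer_instance

def Spec_robot_program (n : Int) (x : Int) (k : Int) (commands : List String) (out : Int) : Prop := ¬ D_robot_program n x k commands → out = robot_program_alt n x k commands
instance (n : Int) (x : Int) (k : Int) (commands : List String) (out : Int) : Decidable (Spec_robot_program n x k commands out) := by unfold Spec_robot_program; infer_instance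

def pvDiffWitness_robot_program : Int × Int × Int × List String := (0, 1, 0, ["L"])
def pvDiffWitnessOut_robot_program : Int × Int := (1, 0)

-- ===== CLAIM (what is proved, stated in full; the proofs are below) =====
def Claim_unchanged_robot_program : Prop := ∀ (n : Int) (x : Int) (k : Int) (commands : List String), Dom_robot_program n x k commands → Spec_robot_program n x k commands (robot_program n x k commands)
def Claim_changed_robot_program : Prop := Dom_robot_program (pvDiffWitness_robot_program.1) (pvDiffWitness_robot_program.2.1) (pvDiffWitness_robot_program.2.2.1) (pvDiffWitness_robot_program.2.2.2) ∧ D_robot_program (pvDiffWitness_robot_program.1) (pvDiffWitness_robot_program.2.1) (pvDiffWitness_robot_program.2.2.1) (pvDiffWitness_robot_program.2.2.2) ∧ robot_program (pvDiffWitness_robot_program.1) (pvDiffWitness_robot_program.2.1) (pvDiffWitness_robot_program.2.2.1) (pvDiffWitness_robot_program.2.2.2) = pvDiffWitnessOut_robot_program.1 ∧ robot_program_alt (pvDiffWitness_robot_program.1) (pvDiffWitness_robot_program.2.1) (pvDiffWitness_robot_program.2.2.1) (pvDiffWitness_robot_program.2.2.2) = pvDiffWitnessOut_robot_program.2 ∧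 pvDiffWitnessOut_robot_program.1 ≠ pvDiffWitnessOut_robot_program.2
def Claim_exact_robot_program : Prop := ∀ (n : Int) (x : Int) (k : Int) (commands : List String), Dom_robot_program n x k commands → D_robot_program n x k commands → robot_program n x k commands ≠ robot_program_alt n x k commands

-- ===== LEMMAS AND PROOFS =====

-- proof-side names for the components of D_
def pvPrefix (commands : List String) : List Int :=
  ((commands.map (fun c => if c = "L" then (-1 : Int) else 1)).scanl (· + ·) 0).tail

def pvHit (x : Int) (commands : List String) : Option Nat :=
  (pvPrefix commands).findIdx? (fun p => x + p = 0)

-- 1-based index of the first command after which the position (starting at x) is 0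
def pvFirstPos : List String → Int → Option Int
  | [], _ => none
  | cm :: rest, x =>
    let x' := if cm = "L" then x - 1 else x + 1
    if x' = 0 then some 1 else (pvFirstPos rest x').map (· + 1)

theorem pvFirstPos_pos : ∀ (cmds : List String) (x j : Int),
    pvFirstPos cmds x = some j → 1 ≤ j := by
  intro cmds
  induction cmds with
  | nil => intro x j h; simp [pvFirstPos] at h
  | cons cm rest ih =>
    intro x j h
    simp only [pvFirstPos] at h
    generalize (if cm = "L" then x - 1 else x + 1) = x' at h
    by_cases h0 : x' = 0
    · rw [if_pos h0] at h; simp at h; omega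
    · rw [if_neg h0] at h
      cases hr : pvFirstPos rest x' with
      | none => rw [hr] at h; simp at h
      | some j' => rw [hr] at h; simp at h; have := ih _ _ hr; omega

theorem robotLoop2_eq : ∀ (cmds : List String) (x t : Int),
    robotLoop2 cmds x t = (pvFirstPos cmds x).map (· + t) := by
  intro cmds
  induction cmds with
  | nil => intro x t; simp [robotLoop2, pvFirstPos]
  | cons cm rest ih =>
    intro x t
    simp only [robotLoop2, pvFirstPos]
    generalize (if cm = "L" then x - 1 else x + 1) = x'
    by_cases h0 : x' = 0
    · simp only [if_pos h0, Option.map_some]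
      congr 1
      omega
    · simp only [if_neg h0]
      rw [ih]
      cases pvFirstPos rest x' with
      | none => simp
      | some a => simp; omega

theorem robotLoop1_eq : ∀ (cmds : List String) (x k : Int),
    robotLoop1 cmds x k =
      match pvFirstPos cmds x with
      | none => none
      | some j => if 1 ≤ k ∧ k < j then none else some (0, k - j) := by
  intro cmds
  induction cmds with
  | nil => intro x k; simp [robotLoop1, pvFirstPos]
  | cons cm rest ih =>
    intro x k
    simp only [robotLoop1, pvFirstPos]
    generalize (if cm = "L" then x - 1 else x + 1) = x'
    by_cases h0 : x' = 0
    · subst h0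
      have hnc : ¬ (1 ≤ k ∧ k < 1) := by omega
      simp [hnc]
    · rw [if_neg h0, if_neg h0]
      by_cases hk : k - 1 = 0
      · rw [if_pos hk]
        cases hr : pvFirstPos rest x' with
        | none => simp
        | some j' =>
          have hj' := pvFirstPos_pos rest x' j' hr
          have hc : (1 ≤ k ∧ k < j' + 1) := by omega
          simp [hc]
      · rw [if_neg hk, ih]
        cases hr : pvFirstPos rest x' with
        | none => simp
        | some j' =>
          simp only [Option.map_some]
          by_cases hc : 1 ≤ k - 1 ∧ k - 1 < j'
          · have hc2 : 1 ≤ k ∧ k < j' + 1 := by omega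
            simp [hc, hc2]
          · have h2 : ¬ (1 ≤ k ∧ k < j' + 1) := by omega
            simp only [if_neg hc, if_neg h2, Option.some.injEq, Prod.mk.injEq]
            exact ⟨trivial, by omega⟩

-- B's scan computes the first hit of the walk from s + x (resp. from s), offset by j - 1
theorem altScan_eq : ∀ (cmds : List String) (x s j : Int) (i0 t : Option Int),
    altScan x cmds s j i0 t =
      ((match i0 with
        | some a => some a
        | none => (pvFirstPos cmds (s + x)).map (· + (j - 1))),
       (match t with
        | some b => some b
        | none => (pvFirstPos cmds s).map (· + (j - 1)))) := by
  intro cmds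
  induction cmds with
  | nil =>
    intro x s j i0 t
    cases i0 <;> cases t <;> simp [altScan, pvFirstPos]
  | cons cm rest ih =>
    intro x s j i0 t
    simp only [altScan, pvFirstPos]
    rw [show s + (if cm = "L" then (-1 : Int) else 1)
          = (if cm = "L" then s - 1 else s + 1) by split <;> ring]
    generalize hS : (if cm = "L" then s - 1 else s + 1) = S
    rw [show (if cm = "L" then (s + x) - 1 else (s + x) + 1) = S + x by
          rw [← hS]; split <;> ring]
    rw [ih]
    congr 1
    · cases i0 with
      | some a => simp
      | none =>
        by_cases h0 : S = -x
        · have hx0 : S + x = 0 := by omega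
          simp only [h0, and_true, if_pos rfl, if_pos hx0]
          simp
        · have hx0 : ¬ (S + x = 0) := by omega
          simp only [h0, and_false, if_false, if_neg hx0]
          cases pvFirstPos rest (S + x) with
          | none => simp
          | some a => simp
    · cases t with
      | some b => simp
      | none =>
        by_cases h0 : S = 0
        · simp only [h0, and_true, if_pos rfl]
          simp
        · simp only [h0, and_false, if_false, if_neg h0]
          cases pvFirstPos rest S with
          | none => simp
          | some b => simp

theorem altScan_main (cmds : List String) (x : Int) :
    altScan x cmds 0 1 none none = (pvFirstPos cmds x, pvFirstPos cmds 0) := by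
  rw [altScan_eq]
  simp

-- link pvHit (the declarative D_ helper) with pvFirstPos
theorem scanl_add_shift : ∀ (l : List Int) (a b : Int),
    l.scanl (· + ·) (a + b) = (l.scanl (· + ·) b).map (a + ·) := by
  intro l
  induction l with
  | nil => simp
  | cons d rest ih =>
    intro a b
    simp only [List.scanl_cons, List.map_cons]
    rw [show a + b + d = a + (b + d) by ring, ih]

theorem pvPrefix_cons (cm : String) (rest : List String) :
    pvPrefix (cm :: rest) =
      (if cm = "L" then (-1 : Int) else 1) ::
        (pvPrefix rest).map ((if cm = "L" then (-1 : Int) else 1) + ·) := by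
  unfold pvPrefix
  simp only [List.map_cons, List.scanl_cons, List.tail_cons]
  rw [show (0 : Int) + (if cm = "L" then (-1 : Int) else 1)
        = (if cm = "L" then (-1 : Int) else 1) + 0 by ring,
      scanl_add_shift]
  cases rest with
  | nil => simp
  | cons c l => simp

theorem pvHit_eq : ∀ (cmds : List String) (x : Int),
    pvFirstPos cmds x = (pvHit x cmds).map (fun j => (j : Int) + 1) := by
  intro cmds
  induction cmds with
  | nil => intro x; simp [pvFirstPos, pvHit, pvPrefix]
  | cons cm rest ih =>
    intro x
    simp only [pvFirstPos]
    unfold pvHit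
    rw [pvPrefix_cons]
    generalize hd : (if cm = "L" then (-1 : Int) else 1) = d
    have hx' : (if cm = "L" then x - 1 else x + 1) = x + d := by
      rw [← hd]; split <;> ring
    rw [hx', List.findIdx?_cons]
    by_cases h0 : x + d = 0
    · simp [h0]
    · simp only [h0, decide_false, if_neg h0, cond_false]
      rw [List.findIdx?_map]
      have : ((fun p => decide (x + p = 0)) ∘ (d + ·)) = (fun p => decide (x + d + p = 0)) := by
        funext p; simp only [Function.comp, ← add_assoc]
      rw [this]
      rw [ih (x + d)]
      unfold pvHit
      cases (pvPrefix rest).findIdx? (fun p => decide (x + d + p = 0)) with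
      | none => simp
      | some j => simp

-- floordiv facts (0 < b)
theorem fdiv_neg_le (a b : Int) (ha : a < 0) (hb : 0 < b) :
    PySem.Int.floordiv a b ≤ -1 := by
  have h := (PySem.Int.floordiv_lt_iff_lt_mul (a := a) (b := b) (q := 0) hb)
  have : PySem.Int.floordiv a b < 0 := h.mpr (by omega)
  omega

theorem fdiv_nonneg (a b : Int) (ha : 0 ≤ a) (hb : 0 < b) :
    0 ≤ PySem.Int.floordiv a b := by
  exact (PySem.Int.le_floordiv_iff_mul_le (a := a) (b := b) (q := 0) hb).mpr (by omega)

theorem fdiv_eq_neg_one (a b : Int) (h1 : -b ≤ a) (h2 : a < 0) (hb : 0 < b) :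
    PySem.Int.floordiv a b = -1 := by
  exact (PySem.Int.floordiv_eq_iff_of_pos hb).mpr (by constructor <;> omega)

theorem fdiv_le_neg_two (a b : Int) (h1 : a < -b) (hb : 0 < b) :
    PySem.Int.floordiv a b ≤ -2 := by
  have h := (PySem.Int.floordiv_lt_iff_lt_mul (a := a) (b := b) (q := -1) hb)
  have : PySem.Int.floordiv a b < -1 := h.mpr (by omega)
  omega

-- both results expressed through pvFirstPos
theorem robot_program_eq (n x k : Int) (cmds : List String) :
    robot_program n x k cmds =
      match pvFirstPos cmds x with
      | none => 0
      | some i0 =>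
        if 1 ≤ k ∧ k < i0 then 0
        else match pvFirstPos cmds 0 with
          | none => 1
          | some t => 1 + PySem.Int.floordiv (k - i0) t := by
  unfold robot_program
  rw [robotLoop1_eq]
  cases pvFirstPos cmds x with
  | none => rfl
  | some i0 =>
    by_cases hc : 1 ≤ k ∧ k < i0
    · simp [hc]
    · simp only [if_neg hc]
      rw [robotLoop2_eq]
      cases pvFirstPos cmds 0 with
      | none => rfl
      | some t => simp

theorem robot_program_alt_eq (n x k : Int) (cmds : List String) :
    robot_program_alt n x k cmds =
      match pvFirstPos cmds x with
      | none => 0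
      | some i0 =>
        match pvFirstPos cmds 0 with
        | none => if i0 ≤ k then 1 else 0
        | some t => max 0 (PySem.Int.floordiv (k - i0) t + 1) := by
  unfold robot_program_alt
  rw [altScan_main]
  cases pvFirstPos cmds x with
  | none => rfl
  | some i0 => cases pvFirstPos cmds 0 <;> rfl

theorem aux_none : ∀ (P : List Int) (x : Int),
    P.findIdx? (fun p => decide (x + p = 0)) = none ↔ -x ∉ P := by
  intro P
  induction P with
  | nil => intro x; simp
  | cons a l ih =>
    intro x
    rw [List.findIdx?_cons]
    by_cases h : x + a = 0
    · have ha : a = -x := by omega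
      simp [h, ha]
    · have ha : a ≠ -x := by omega
      simp [h, Ne.symm ha, ih x]

theorem aux_some : ∀ (P : List Int) (x : Int) (j : Nat),
    P.findIdx? (fun p => decide (x + p = 0)) = some j → P.idxOf (-x) = j := by
  intro P
  induction P with
  | nil => intro x j h; simp at h
  | cons a l ih =>
    intro x j h
    rw [List.findIdx?_cons] at h
    by_cases h0 : x + a = 0
    · have ha : a = -x := by omega
      simp [h0] at h
      rw [List.idxOf_cons_eq l ha, ← h]
    · have ha : a ≠ -x := by omega
      simp only [h0, decide_false, cond_false] at h
      cases hl : l.findIdx? fun p => decide (x + p = 0) with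
      | none => rw [hl] at h; simp at h
      | some j' =>
        rw [hl] at h
        simp at h
        rw [List.idxOf_cons_ne l ha, ih x j' hl]
        omega

theorem D_iff (n x k : Int) (cmds : List String) :
    D_robot_program n x k cmds ↔
      (k ≤ 0 ∧
        match pvFirstPos cmds x, pvFirstPos cmds 0 with
        | some i0, some t => k < i0 - t
        | some _, none => True
        | none, _ => False) := by
  unfold D_robot_program
  rw [show pvDisp cmds = pvPrefix cmds from rfl,
      pvHit_eq cmds x, pvHit_eq cmds 0]
  cases hx : pvHit x cmds with
  | none =>
    have hm : -x ∉ pvPrefix cmds := (aux_none _ _).mp hx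
    simp [hm]
  | some i0 =>
    have hx' : (pvPrefix cmds).findIdx? (fun p => decide (x + p = 0)) = some i0 := hx
    have hmem : -x ∈ pvPrefix cmds := by
      by_contra hm
      rw [(aux_none _ x).mpr hm] at hx'
      simp at hx'
    have hidx : (pvPrefix cmds).idxOf (-x) = i0 := aux_some _ _ _ hx'
    cases h0 : pvHit 0 cmds with
    | none =>
      have hm0 : (0 : Int) ∉ pvPrefix cmds := by
        have h := (aux_none (pvPrefix cmds) 0).mp h0
        simpa using h
      simp [hmem, hm0, hidx]
    | some t =>
      have h0' : (pvPrefix cmds).findIdx? (fun p => decide (0 + p = 0)) = some t := h0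
      have hmem0 : (0 : Int) ∈ pvPrefix cmds := by
        by_contra hm
        rw [(aux_none _ 0).mpr (by simpa using hm)] at h0'
        simp at h0'
      have hidx0 : (pvPrefix cmds).idxOf (0 : Int) = t := by
        have h := aux_some _ _ _ h0'
        simpa using h
      simp only [hidx, hidx0, Option.map_some]
      simp only [hmem, hmem0, true_and, not_true, false_or]
      show k ≤ 0 ∧ k < (i0 : Int) - (t : Int) ↔
        k ≤ 0 ∧ k < ((i0 : Int) + 1) - ((t : Int) + 1)
      constructor
      · rintro ⟨h1, h2⟩
        exact ⟨h1, by omega⟩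
      · rintro ⟨h1, h2⟩
        exact ⟨h1, by omega⟩

-- ===== VERDICT (by name: the statements are the Claim_ definitions above) =====
theorem robot_program_spec : Claim_unchanged_robot_program := by
  intro n x k cmds _
  unfold Spec_robot_program
  intro hD
  rw [D_iff] at hD
  rw [robot_program_eq, robot_program_alt_eq]
  cases hi : pvFirstPos cmds x with
  | none => rfl
  | some i0 =>
    have hi0 : 1 ≤ i0 := pvFirstPos_pos cmds x i0 hi
    cases ht : pvFirstPos cmds 0 with
    | none =>
      simp only
      have hk : ¬ k ≤ 0 := fun h => hD ⟨h, by rw [hi, ht]; trivial⟩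
      by_cases hc : 1 ≤ k ∧ k < i0
      · have : ¬ i0 ≤ k := by omega
        simp [hc, this]
      · have : i0 ≤ k := by omega
        simp [hc, this]
    | some t =>
      have ht1 : 1 ≤ t := pvFirstPos_pos cmds 0 t ht
      simp only
      have hD' : ¬ (k ≤ 0 ∧ k < i0 - t) := fun ⟨h1, h2⟩ => hD ⟨h1, by rw [hi, ht]; exact h2⟩
      by_cases hc : 1 ≤ k ∧ k < i0
      · have h1 : PySem.Int.floordiv (k - i0) t ≤ -1 :=
          fdiv_neg_le _ _ (by omega) (by omega)
        have : max 0 (PySem.Int.floordiv (k - i0) t + 1) = 0 :=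
          max_eq_left (by omega)
        simp [hc, this]
      · simp only [if_neg hc]
        by_cases hk : 1 ≤ k
        · -- then k ≥ i0, quotient nonneg
          have h0 : 0 ≤ PySem.Int.floordiv (k - i0) t :=
            fdiv_nonneg _ _ (by omega) (by omega)
          rw [max_eq_right (by omega)]
          ring
        · -- k ≤ 0, and ¬D gives i0 - t ≤ k, so the quotient is exactly -1
          have hkk : k ≤ 0 := by omega
          have hge : i0 - t ≤ k := by
            by_contra hlt
            exact hD' ⟨hkk, by omega⟩
          have h1 : PySem.Int.floordiv (k - i0) t = -1 :=
            fdiv_eq_neg_one _ _ (by omega) (by omega) (by omega)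
          rw [h1]
          norm_num

theorem robot_program_changed : Claim_changed_robot_program := by
  unfold Claim_changed_robot_program; decide

theorem robot_program_tight : Claim_exact_robot_program := by
  intro n x k cmds _ hD
  rw [D_iff] at hD
  obtain ⟨hk, hrest⟩ := hD
  rw [robot_program_eq, robot_program_alt_eq]
  cases hi : pvFirstPos cmds x with
  | none => rw [hi] at hrest; exact absurd hrest (by simp)
  | some i0 =>
    have hi0 : 1 ≤ i0 := pvFirstPos_pos cmds x i0 hi
    have hnc : ¬ (1 ≤ k ∧ k < i0) := by omega
    cases ht : pvFirstPos cmds 0 with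
    | none =>
      have : ¬ i0 ≤ k := by omega
      simp [hnc, this]
    | some t =>
      rw [hi, ht] at hrest
      have ht1 : 1 ≤ t := pvFirstPos_pos cmds 0 t ht
      have h2 : PySem.Int.floordiv (k - i0) t ≤ -2 :=
        fdiv_le_neg_two _ _ (by omega) (by omega)
      simp only [if_neg hnc]
      rw [max_eq_left (by omega)]
      generalize PySem.Int.floordiv (k - i0) t = q at h2 ⊢
      exact ne_of_lt (by linarith)
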